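-- pv_equiv track=rewrite | github.com/b117014/Python_programm | longest_suffix_and_prefix.py | find_pre_suf
-- ===== SOURCE A (Python) =====
-- def find_pre_suf(s):
--     l =len(s);
--
--     for i in range(l//2 ,0 , -1):
--         prefix = s[0:i]
--         suffix = s[l-i:l]
--         if prefix==suffix:
--             return i;
--     return 0;
-- ===== SOURCE B (Python) =====
-- def find_pre_suf(s):
--     # KMP prefix function; then follow failure links to the largest border <= len(s)//2
--     n = len(s)
--     pi = [0] * n
--     k = 0
--     for i in range(1, n):
--         while k > 0 and s[i] != s[k]:
--             k = pi[k - 1]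
--         if s[i] == s[k]:
--             k += 1
--         pi[i] = k
--     ans = pi[n - 1] if n > 0 else 0
--     while ans > n // 2:
--         ans = pi[ans - 1]
--     return ans
-- ===== Notes on version B (the rewrite author's own statement) =====
-- stated objective: faster
-- what changed: Replaced A's descending scan that compares a fresh prefix/suffix slice pair for every candidate length with the linear-time KMP prefix-function, following failure links to the largest border of length at most len(s)//2.
import Mathlib
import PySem

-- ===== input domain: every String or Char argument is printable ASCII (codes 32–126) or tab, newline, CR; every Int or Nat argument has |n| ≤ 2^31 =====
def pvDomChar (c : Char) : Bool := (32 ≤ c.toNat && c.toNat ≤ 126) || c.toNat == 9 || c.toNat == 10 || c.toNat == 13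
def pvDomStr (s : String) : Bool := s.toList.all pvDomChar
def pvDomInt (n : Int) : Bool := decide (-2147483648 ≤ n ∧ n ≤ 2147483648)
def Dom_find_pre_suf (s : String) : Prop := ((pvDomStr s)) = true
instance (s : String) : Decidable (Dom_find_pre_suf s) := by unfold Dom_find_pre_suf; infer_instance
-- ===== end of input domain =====

-- B replaces A's quadratic descending scan over candidate lengths by the linear KMP
-- prefix-function with failure-link descent to the largest border ≤ len(s)//2 (objective: faster).

-- ===== PORT A =====
-- A: for i in range(l//2, 0, -1): compare s[0:i] with s[l-i:l], return first match, else 0.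
def findLoopA (cs : List Char) (l : Int) : List Int → Int
  | [] => 0
  | i :: rest =>
      if PySem.List.slice cs (some 0) (some i) = PySem.List.slice cs (some (l - i)) (some l)
      then i else findLoopA cs l rest

def find_pre_suf (s : String) : Int :=
  let l : Int := PySem.Str.len s
  findLoopA s.toList l (PySem.List.pyRange (PySem.Int.floordiv l 2) 0 (-1))

-- ===== PORT B =====
-- while k > 0 and s[i] != s[k]: k = pi[k-1]   (fuel = k only makes the recursion total)
def kmpAdjust (cs : List Char) (pi : List Nat) (c : Char) : Nat → Nat → Nat
  | _, 0 => 0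
  | 0, k => k
  | fuel+1, k+1 => if c = cs.getD (k+1) ' ' then k+1 else kmpAdjust cs pi c fuel (pi.getD k 0)

-- the while loop followed by: if s[i] == s[k]: k += 1
def kmpStep (cs : List Char) (pi : List Nat) (c : Char) (k : Nat) : Nat :=
  let k1 := kmpAdjust cs pi c k k
  if c = cs.getD k1 ' ' then k1 + 1 else k1

-- while ans > n // 2: ans = pi[ans-1]   (fuel = initial ans only makes the recursion total)
def kmpFollow (pi : List Nat) (half : Nat) : Nat → Nat → Nat
  | 0, a => a
  | fuel+1, a => if a ≤ half then a else kmpFollow pi half fuel (pi.getD (a-1) 0)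

def find_pre_suf_alt (s : String) : Int :=
  let cs := s.toList
  let n := cs.length
  let st := (PySem.List.pyRange 1 (n : Int) 1).foldl
      (fun st i =>
        let k2 := kmpStep cs st.1 (cs.getD i.toNat ' ') st.2
        (st.1.set i.toNat k2, k2))
      (List.replicate n 0, 0)
  let ans0 := if 0 < n then st.1.getD (n-1) 0 else 0
  ((kmpFollow st.1 (n/2) ans0 ans0 : Nat) : Int)

-- ===== PRECONDITION & SPEC =====
def Spec_find_pre_suf (s : String) (out : Int) : Prop := out = find_pre_suf_alt s
instance (s : String) (out : Int) : Decidable (Spec_find_pre_suf s out) := by unfold Spec_find_pre_suf; infer_instance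

-- ===== CLAIM (what is proved, stated in full; the proofs are below) =====
def Claim_equal_find_pre_suf : Prop := ∀ (s : String), Dom_find_pre_suf s → Spec_find_pre_suf s (find_pre_suf s)

-- ===== LEMMAS AND PROOFS =====

-- `k` is a (weak) border of the length-`m` prefix of `cs`: the first `k` chars equal the
-- last `k` chars of that prefix.  (`abbrev` so Decidable instances see through it.)
abbrev WB (cs : List Char) (m k : Nat) : Prop :=
  k ≤ m ∧ m ≤ cs.length ∧ cs.take k = (cs.take m).drop (m - k)

abbrev Bd (cs : List Char) (m k : Nat) : Prop := k < m ∧ WB cs m k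

-- longest proper border of the length-m prefix of cs
def bord (cs : List Char) (m : Nat) : Nat := Nat.findGreatest (Bd cs m) (m - 1)

theorem wb_zero {cs : List Char} {m : Nat} (h : m ≤ cs.length) : WB cs m 0 := by
  refine ⟨Nat.zero_le _, h, ?_⟩
  simp

theorem wb_trans {cs : List Char} {m a b : Nat} (h1 : WB cs m a) (h2 : WB cs a b) :
    WB cs m b := by
  refine ⟨le_trans h2.1 h1.1, h1.2.1, ?_⟩
  rw [h2.2.2, h1.2.2, List.drop_drop]
  congr 1
  omega

theorem wb_down {cs : List Char} {m a b : Nat} (h1 : WB cs m a) (h2 : WB cs m b)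
    (hba : b < a) : Bd cs a b := by
  refine ⟨hba, le_of_lt hba, le_trans h1.1 h1.2.1, ?_⟩
  rw [h2.2.2, h1.2.2, List.drop_drop]
  congr 1
  omega

theorem bd_trans {cs : List Char} {m a b : Nat} (h1 : Bd cs m a) (h2 : Bd cs a b) :
    Bd cs m b :=
  ⟨lt_trans h2.1 h1.1, wb_trans h1.2 h2.2⟩

theorem take_succ_getD {cs : List Char} {j : Nat} (h : j < cs.length) :
    cs.take (j+1) = cs.take j ++ [cs.getD j ' '] := by
  rw [List.take_succ, List.getElem?_eq_getElem h, List.getD_eq_getElem cs ' ' h]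
  rfl

theorem ext_mpr {cs : List Char} {m k : Nat} (hk : k < m) (hm : m < cs.length)
    (hwb : WB cs m k) (hc : cs.getD m ' ' = cs.getD k ' ') : Bd cs (m+1) (k+1) := by
  refine ⟨by omega, by omega, by omega, ?_⟩
  have hidx : m + 1 - (k + 1) = m - k := by omega
  rw [hidx, take_succ_getD (by omega), take_succ_getD hm,
    List.drop_append_of_le_length (by simp; omega), ← hwb.2.2, hc]

theorem ext_mp {cs : List Char} {m k : Nat} (h : Bd cs (m+1) (k+1)) :
    k < m ∧ WB cs m k ∧ cs.getD m ' ' = cs.getD k ' ' := by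
  obtain ⟨hlt, _, hlen, heq⟩ := h
  have hk : k < m := by omega
  have hm : m < cs.length := by omega
  have hidx : m + 1 - (k + 1) = m - k := by omega
  rw [hidx, take_succ_getD (by omega), take_succ_getD hm,
    List.drop_append_of_le_length (by simp; omega)] at heq
  obtain ⟨h1, h2⟩ := List.append_inj' heq (by simp)
  have h3 : cs.getD k ' ' = cs.getD m ' ' := by simpa using h2
  exact ⟨hk, ⟨by omega, by omega, h1⟩, h3.symm⟩

theorem bord_le {cs : List Char} {m : Nat} : bord cs m ≤ m - 1 :=
  Nat.findGreatest_le _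

theorem bord_lt {cs : List Char} {m : Nat} (h : 1 ≤ m) : bord cs m < m := by
  have := @bord_le cs m; omega

theorem bord_bd {cs : List Char} {m : Nat} (h : 0 < bord cs m) : Bd cs m (bord cs m) :=
  Nat.findGreatest_of_ne_zero rfl (by omega)

theorem bd_le_bord {cs : List Char} {m k : Nat} (h : Bd cs m k) : k ≤ bord cs m :=
  Nat.le_findGreatest (by have := h.1; omega) h

theorem bord_wb {cs : List Char} {m : Nat} (h1 : 1 ≤ m) (h2 : m ≤ cs.length) :
    WB cs m (bord cs m) := by
  rcases Nat.eq_zero_or_pos (bord cs m) with h | h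
  · rw [h]; exact wb_zero h2
  · exact (bord_bd h).2

theorem bord_succ_le {cs : List Char} {m : Nat} (hm : m < cs.length) :
    bord cs (m+1) ≤ bord cs m + 1 := by
  by_contra hcon
  have hpos : 0 < bord cs (m+1) := by omega
  have hbd := bord_bd hpos
  obtain ⟨j, hj⟩ : ∃ j, bord cs (m+1) = j + 1 := ⟨bord cs (m+1) - 1, by omega⟩
  rw [hj] at hbd
  obtain ⟨hjm, hwb, _⟩ := ext_mp hbd
  have : j ≤ bord cs m := bd_le_bord ⟨hjm, hwb⟩
  omega

theorem kmpAdjust_zero (cs : List Char) (pi : List Nat) (c : Char) (fuel : Nat) :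
    kmpAdjust cs pi c fuel 0 = 0 := by
  cases fuel <;> simp [kmpAdjust]

theorem kmpAdjust_succ (cs : List Char) (pi : List Nat) (c : Char) (f k : Nat) :
    kmpAdjust cs pi c (f+1) (k+1)
      = if c = cs.getD (k+1) ' ' then k+1 else kmpAdjust cs pi c f (pi.getD k 0) := by
  simp [kmpAdjust]

-- the failure-link while loop followed by the conditional increment computes the
-- longest proper border of the length-(m+1) prefix
theorem adj {cs : List Char} {pi : List Nat} {m : Nat} (hm : m < cs.length) :
    ∀ k fuel, k ≤ fuel → k < m → WB cs m k → bord cs (m+1) ≤ k + 1 →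
      (∀ j, 1 ≤ j → j ≤ k → pi.getD (j-1) 0 = bord cs j) →
      (if cs.getD m ' ' = cs.getD (kmpAdjust cs pi (cs.getD m ' ') fuel k) ' '
       then kmpAdjust cs pi (cs.getD m ' ') fuel k + 1
       else kmpAdjust cs pi (cs.getD m ' ') fuel k) = bord cs (m+1) := by
  intro k
  induction k using Nat.strong_induction_on with
  | _ k IH =>
    intro fuel hf hk hwb hb hpi
    rcases k with _ | k
    · rw [kmpAdjust_zero]
      by_cases hc : cs.getD m ' ' = cs.getD 0 ' '
      · rw [if_pos hc]
        have hbd : Bd cs (m+1) 1 := ext_mpr hk hm (wb_zero (le_of_lt hm)) hc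
        have h1 : 1 ≤ bord cs (m+1) := bd_le_bord hbd
        omega
      · rw [if_neg hc]
        rcases Nat.eq_zero_or_pos (bord cs (m+1)) with h0 | hpos
        · exact h0.symm
        · exfalso
          have hbd := bord_bd hpos
          have h1 : bord cs (m+1) = 1 := by omega
          rw [h1] at hbd
          exact hc (ext_mp hbd).2.2
    · rcases fuel with _ | f
      · omega
      rw [kmpAdjust_succ]
      by_cases hc : cs.getD m ' ' = cs.getD (k+1) ' '
      · rw [if_pos hc, if_pos hc]
        have hbd : Bd cs (m+1) (k+2) := ext_mpr hk hm hwb hc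
        have := bd_le_bord hbd
        omega
      · rw [if_neg hc]
        have hkk : pi.getD k 0 = bord cs (k+1) := hpi (k+1) (by omega) (le_refl _)
        rw [hkk]
        have hk'lt : bord cs (k+1) < k+1 := bord_lt (by omega)
        have hwb' : WB cs m (bord cs (k+1)) :=
          wb_trans hwb (bord_wb (by omega) (by omega))
        have hb' : bord cs (m+1) ≤ bord cs (k+1) + 1 := by
          by_contra hcon
          have hpos : 0 < bord cs (m+1) := by omega
          have hbd := bord_bd hpos
          obtain ⟨j, hj⟩ : ∃ j, bord cs (m+1) = j + 1 := ⟨bord cs (m+1) - 1, by omega⟩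
          rw [hj] at hbd
          obtain ⟨hjm, hwbj, hcj⟩ := ext_mp hbd
          have hjk : j ≤ k + 1 := by omega
          rcases eq_or_lt_of_le hjk with rfl | hltj
          · exact hc hcj
          · have hbdj : Bd cs (k+1) j := wb_down hwb hwbj hltj
            have := bd_le_bord hbdj
            omega
        exact IH (bord cs (k+1)) hk'lt f (by omega) (by omega) hwb' hb'
          (fun j h1 h2 => hpi j h1 (by omega))

-- one foldl step of B's main loop
def pvStep (cs : List Char) (st : List Nat × Nat) (i : Int) : List Nat × Nat :=
  let k2 := kmpStep cs st.1 (cs.getD i.toNat ' ') st.2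
  (st.1.set i.toNat k2, k2)

def loopSt (cs : List Char) (i : Nat) : List Nat × Nat :=
  (PySem.List.pyRange 1 (i : Int) 1).foldl (pvStep cs) (List.replicate cs.length 0, 0)

theorem getD_replicate (n j : Nat) : (List.replicate n (0:Nat)).getD j 0 = 0 := by
  simp [List.getD, List.getElem?_replicate]
  split <;> simp

theorem loop_inv (cs : List Char) :
    ∀ i, 1 ≤ i → i ≤ cs.length →
      (loopSt cs i).1.length = cs.length ∧
      (loopSt cs i).2 = bord cs i ∧
      (∀ j, 1 ≤ j → j ≤ i → (loopSt cs i).1.getD (j-1) 0 = bord cs j) := by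
  intro i hi
  induction i, hi using Nat.le_induction with
  | base =>
    intro _
    have hr : PySem.List.pyRange 1 ((1:Nat) : Int) 1 = [] :=
      PySem.List.pyRange_one_eq_nil (by norm_num)
    have hb1 : bord cs 1 = 0 := by simp [bord]
    unfold loopSt
    rw [hr]
    refine ⟨by simp, by simpa [hb1] , ?_⟩
    intro j h1 h2
    have : j = 1 := by omega
    subst this
    simpa [hb1] using getD_replicate cs.length 0
  | succ i hi IH =>
    intro hlen
    obtain ⟨IH1, IH2, IH3⟩ := IH (by omega)
    have hsplit : PySem.List.pyRange 1 ((i+1 : Nat) : Int) 1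
        = PySem.List.pyRange 1 ((i:Nat) : Int) 1 ++ [((i:Nat) : Int)] := by
      push_cast
      exact PySem.List.pyRange_one_succ_right (by exact_mod_cast hi)
    unfold loopSt
    rw [hsplit, List.foldl_append]
    have hfold : (PySem.List.pyRange 1 ((i:Nat) : Int) 1).foldl (pvStep cs)
        (List.replicate cs.length 0, 0) = loopSt cs i := rfl
    rw [hfold]
    have him : i < cs.length := by omega
    have hstep : kmpStep cs (loopSt cs i).1 (cs.getD i ' ') (bord cs i) = bord cs (i+1) := by
      unfold kmpStep
      exact adj him (bord cs i) (bord cs i) (le_refl _) (bord_lt hi)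
        (bord_wb hi (by omega)) (bord_succ_le him)
        (fun j h1 h2 => IH3 j h1 (by have := bord_lt (cs := cs) hi; omega))
    have hset : List.foldl (pvStep cs) (loopSt cs i) [((i:Nat) : Int)]
        = ((loopSt cs i).1.set i (bord cs (i+1)), bord cs (i+1)) := by
      simp only [List.foldl_cons, List.foldl_nil, pvStep, Int.toNat_natCast, IH2, hstep]
    rw [hset]
    refine ⟨by simp [IH1], rfl, ?_⟩
    intro j h1 h2
    rcases Nat.lt_or_ge j (i+1) with hj | hj
    · have hne : i ≠ j - 1 := by omega
      have : ((loopSt cs i).1.set i (bord cs (i+1))).getD (j-1) 0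
          = (loopSt cs i).1.getD (j-1) 0 := by
        simp [List.getD, List.getElem?_set_ne hne]
      rw [this]
      exact IH3 j h1 (by omega)
    · have hj1 : j = i + 1 := by omega
      subst hj1
      have : i < (loopSt cs i).1.length := by omega
      simp [List.getD, List.getElem?_set_self, this]

theorem fw {cs : List Char} {pi : List Nat}
    (hpi : ∀ j, 1 ≤ j → j ≤ cs.length → pi.getD (j-1) 0 = bord cs j) :
    ∀ a fuel, a ≤ fuel → (a = 0 ∨ Bd cs cs.length a) →
      (∀ j, Bd cs cs.length j → a < j → cs.length / 2 < j) →
      kmpFollow pi (cs.length / 2) fuel a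
        = Nat.findGreatest (Bd cs cs.length) (cs.length / 2) := by
  intro a
  induction a using Nat.strong_induction_on with
  | _ a IH =>
    intro fuel hf ha hchain
    by_cases hhalf : a ≤ cs.length / 2
    · have hres : kmpFollow pi (cs.length / 2) fuel a = a := by
        cases fuel <;> simp [kmpFollow, hhalf]
      rw [hres]
      have h1 : a ≤ Nat.findGreatest (Bd cs cs.length) (cs.length / 2) := by
        rcases ha with rfl | hbd
        · exact Nat.zero_le _
        · exact Nat.le_findGreatest hhalf hbd
      have h2 : Nat.findGreatest (Bd cs cs.length) (cs.length / 2) ≤ a := by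
        by_contra hcon
        have hbd : Bd cs cs.length (Nat.findGreatest (Bd cs cs.length) (cs.length / 2)) :=
          Nat.findGreatest_of_ne_zero rfl (by omega)
        have hgt := hchain _ hbd (by omega)
        have := Nat.findGreatest_le (P := Bd cs cs.length) (cs.length / 2)
        omega
      omega
    · rcases ha with rfl | hbd
      · omega
      have ha1 : 1 ≤ a := by omega
      rcases fuel with _ | f
      · omega
      have hstep : kmpFollow pi (cs.length / 2) (f+1) a
          = kmpFollow pi (cs.length / 2) f (pi.getD (a-1) 0) := by
        simp [kmpFollow, hhalf]
      have hget : pi.getD (a-1) 0 = bord cs a := hpi a ha1 (by have := hbd.1; omega)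
      rw [hstep, hget]
      have hblt : bord cs a < a := bord_lt ha1
      apply IH (bord cs a) hblt f (by omega)
      · rcases Nat.eq_zero_or_pos (bord cs a) with h0 | hpos
        · exact Or.inl h0
        · exact Or.inr (bd_trans hbd (bord_bd hpos))
      · intro j hj hlt
        rcases Nat.lt_trichotomy j a with hja | hja | hja
        · exfalso
          have hbdj : Bd cs a j := wb_down hbd.2 hj.2 hja
          have := bd_le_bord hbdj
          omega
        · subst hja; omega
        · exact hchain j hj hja

theorem alt_eq (s : String) :
    find_pre_suf_alt s
      = ((Nat.findGreatest (Bd s.toList s.toList.length) (s.toList.length / 2) : Nat) : Int) := by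
  by_cases hn : s.toList.length = 0
  · have hnil : s.toList = [] := List.length_eq_zero_iff.mp hn
    simp only [find_pre_suf_alt, hnil]
    rw [PySem.List.pyRange_one_eq_nil (by norm_num)]
    simp [kmpFollow]
  · have hn1 : 1 ≤ s.toList.length := by omega
    obtain ⟨L1, L2, L3⟩ := loop_inv s.toList s.toList.length hn1 (le_refl _)
    have halt : find_pre_suf_alt s
        = ((kmpFollow (loopSt s.toList s.toList.length).1 (s.toList.length / 2)
            ((loopSt s.toList s.toList.length).1.getD (s.toList.length - 1) 0)
            ((loopSt s.toList s.toList.length).1.getD (s.toList.length - 1) 0) : Nat) : Int) := by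
      simp only [find_pre_suf_alt]
      rw [if_pos (show 0 < s.toList.length from hn1)]
      rfl
    have hget : (loopSt s.toList s.toList.length).1.getD (s.toList.length - 1) 0
        = bord s.toList s.toList.length := L3 s.toList.length hn1 (le_refl _)
    rw [halt, hget]
    congr 1
    refine fw (fun j h1 h2 => L3 j h1 h2) (bord s.toList s.toList.length)
      (bord s.toList s.toList.length) (le_refl _) ?_ ?_
    · rcases Nat.eq_zero_or_pos (bord s.toList s.toList.length) with h0 | hpos
      · exact Or.inl h0
      · exact Or.inr (bord_bd hpos)
    · intro j hj hlt
      exact absurd (bd_le_bord hj) (by omega)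

theorem a_loop (cs : List Char) :
    ∀ h : Nat, h ≤ cs.length / 2 →
      findLoopA cs (cs.length : Int) (PySem.List.pyRange (h : Int) 0 (-1))
        = ((Nat.findGreatest (Bd cs cs.length) h : Nat) : Int) := by
  intro h
  induction h with
  | zero =>
    intro _
    rw [PySem.List.pyRange_neg_one_eq_nil (by norm_num)]
    simp [findLoopA]
  | succ h IHh =>
    intro hle
    have hn2 : h + 1 < cs.length := by omega
    rw [PySem.List.pyRange_neg_one_cons (by positivity)]
    have hcast : ((h+1 : Nat) : Int) - 1 = ((h : Nat) : Int) := by push_cast; ring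
    rw [hcast]
    simp only [findLoopA]
    have hs1 : PySem.List.slice cs (some 0) (some ((h+1 : Nat) : Int)) = cs.take (h+1) := by
      rw [PySem.List.slice_zero_start, PySem.List.slice_to_natCast]
    have hc2 : (cs.length : Int) - ((h+1 : Nat) : Int) = ((cs.length - (h+1) : Nat) : Int) := by
      rw [Nat.cast_sub (le_of_lt hn2)]
    have hs2 : PySem.List.slice cs (some ((cs.length - (h+1) : Nat) : Int))
        (some ((cs.length : Nat) : Int)) = cs.drop (cs.length - (h+1)) := by
      rw [PySem.List.slice_natCast]
      have h1 : cs.length - (cs.length - (h+1)) = h+1 := by omega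
      rw [h1]
      exact List.take_of_length_le (by simp; omega)
    rw [hs1, hc2, hs2]
    by_cases hcond : cs.take (h+1) = cs.drop (cs.length - (h+1))
    · rw [if_pos hcond]
      have hbd : Bd cs cs.length (h+1) :=
        ⟨hn2, by omega, le_refl _, by rw [List.take_length]; exact hcond⟩
      rw [Nat.findGreatest_eq hbd]
    · rw [if_neg hcond]
      have hnbd : ¬ Bd cs cs.length (h+1) := by
        intro hbd
        apply hcond
        have heq := hbd.2.2.2
        rwa [List.take_length] at heq
      rw [Nat.findGreatest_of_not hnbd]
      exact IHh (by omega)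

theorem a_eq (s : String) :
    find_pre_suf s
      = ((Nat.findGreatest (Bd s.toList s.toList.length) (s.toList.length / 2) : Nat) : Int) := by
  simp only [find_pre_suf]
  have hlen : PySem.Str.len s = (s.toList.length : Int) := by simp
  have hdiv : PySem.Int.floordiv ((s.toList.length : Nat) : Int) 2
      = ((s.toList.length / 2 : Nat) : Int) := by
    exact_mod_cast PySem.Int.floordiv_natCast s.toList.length 2
  rw [hlen, hdiv]
  exact a_loop s.toList (s.toList.length / 2) (le_refl _)

-- ===== VERDICT (by name: the statement is the Claim_ definition above) =====
theorem find_pre_suf_spec : Claim_equal_find_pre_suf := by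
  intro s _
  unfold Spec_find_pre_suf
  rw [a_eq, alt_eq]
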